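-- pv_equiv track=rewrite | github.com/hsaless/Seguranca-Computacional | Listas De Exercicios/Lista De Exercicios 1/shift_cipher_decodbf.py | shift_cipher_decodbf
-- ===== SOURCE A (Python) =====
-- def shift_cipher_decodbf(cipher_text):
--     possible_plaintexts = []
--
--     for k in range(26):
--         plain_text = ""
--         for letra in cipher_text:
--             if letra.isalpha():
--                 if letra.islower():
--                     base = ord("a")
--                     substituto = (((ord(letra) - base) - k) % 26) + base
--                     plain_text += chr(substituto)
--                 else:
--                     base = ord("A")
--                     substituto = (((ord(letra) - base) - k) % 26) + base
--                     plain_text += chr(substituto)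
--             else:
--                 plain_text += letra
--
--         possible_plaintexts.append((plain_text, k))
--
--     return possible_plaintexts
-- ===== SOURCE B (Python) =====
-- def shift_cipher_decodbf(cipher_text):
--     # Rolling re-implementation: each decoding is obtained from the previous
--     # one by shifting every letter back one position, instead of rescanning
--     # the original cipher text for every k.
--     def back1(ch):
--         if ch.isalpha():
--             base = ord('a') if ch.islower() else ord('A')
--             return chr((ord(ch) - base + 25) % 26 + base)
--         return ch
--
--     results = [(cipher_text, 0)]
--     current = cipher_text
--     for k in range(1, 26):
--         current = "".join(back1(ch) for ch in current)
--         results.append((current, k))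
--     return results
-- ===== Notes on version B (the rewrite author's own statement) =====
-- stated objective: alternative
-- what changed: B computes the 26 decodings incrementally as rolling state — each plaintext is the previous one with every letter shifted back by one — instead of A's 26 independent rescans of the original text with the full mod-26 formula.
import Mathlib
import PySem

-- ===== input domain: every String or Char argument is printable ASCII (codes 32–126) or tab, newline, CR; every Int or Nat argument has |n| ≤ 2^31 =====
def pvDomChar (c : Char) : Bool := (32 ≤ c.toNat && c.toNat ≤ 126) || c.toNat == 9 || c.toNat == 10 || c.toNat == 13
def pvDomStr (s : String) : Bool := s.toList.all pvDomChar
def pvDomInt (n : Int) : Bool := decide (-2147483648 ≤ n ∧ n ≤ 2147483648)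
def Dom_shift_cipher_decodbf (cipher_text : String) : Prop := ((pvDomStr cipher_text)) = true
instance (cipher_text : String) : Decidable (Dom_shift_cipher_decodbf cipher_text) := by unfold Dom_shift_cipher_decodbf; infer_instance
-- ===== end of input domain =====

-- B replaces A's 26 independent rescans of the original cipher text by a rolling
-- decoding: each plaintext is the previous one shifted back by one letter (alternative
-- decomposition, same cost).

-- ===== PORT A =====
-- per-character body of A's inner loop (same branches, same arithmetic)
def pvDecodeChar (k : Int) (letra : Char) : Char :=
  if PySem.Chars.isalpha letra then
    if PySem.Chars.islower letra then
      let base : Int := 97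
      let substituto : Int := PySem.Int.mod (((letra.toNat : Int) - base) - k) 26 + base
      Char.ofNat substituto.toNat
    else
      let base : Int := 65
      let substituto : Int := PySem.Int.mod (((letra.toNat : Int) - base) - k) 26 + base
      Char.ofNat substituto.toNat
  else letra

def shift_cipher_decodbf (cipher_text : String) : List (String × Int) :=
  (PySem.List.pyRange 0 26 1).foldl
    (fun possible_plaintexts k =>
      let plain_text : List Char :=
        cipher_text.toList.foldl (fun pt letra => pt ++ [pvDecodeChar k letra]) []
      possible_plaintexts ++ [(String.ofList plain_text, k)])
    []

-- ===== PORT B =====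
-- shift one alphabetic character back by exactly one position (Source B's back1)
def pvBack1 (ch : Char) : Char :=
  if PySem.Chars.isalpha ch then
    let base : Int := if PySem.Chars.islower ch then 97 else 65
    Char.ofNat (PySem.Int.mod (((ch.toNat : Int) - base) + 25) 26 + base).toNat
  else ch

def shift_cipher_decodbf_alt (cipher_text : String) : List (String × Int) :=
  ((PySem.List.pyRange 1 26 1).foldl
    (fun (st : List Char × List (String × Int)) k =>
      let current := st.1.map pvBack1
      (current, st.2 ++ [(String.ofList current, k)]))
    (cipher_text.toList, [(cipher_text, 0)])).2

-- ===== PRECONDITION & SPEC =====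
def Spec_shift_cipher_decodbf (cipher_text : String) (out : List (String × Int)) : Prop := out = shift_cipher_decodbf_alt cipher_text
instance (cipher_text : String) (out : List (String × Int)) : Decidable (Spec_shift_cipher_decodbf cipher_text out) := by unfold Spec_shift_cipher_decodbf; infer_instance

-- ===== CLAIM (what is proved, stated in full; the proofs are below) =====
def Claim_equal_shift_cipher_decodbf : Prop := ∀ (cipher_text : String), Dom_shift_cipher_decodbf cipher_text → Spec_shift_cipher_decodbf cipher_text (shift_cipher_decodbf cipher_text)

-- ===== LEMMAS AND PROOFS =====

theorem pv_toNat_ofNat (n : Nat) (h : n < 55296) : (Char.ofNat n).toNat = n := by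
  have hv : Nat.isValidChar n := Or.inl h
  rw [Char.ofNat, dif_pos hv]
  show (UInt32.ofNatLT n _).toNat = n
  exact rfl

theorem pv_islower_iff (c : Char) : PySem.Chars.islower c = true ↔ 97 ≤ c.toNat ∧ c.toNat ≤ 122 := by
  simp only [PySem.Chars.islower, Char.le_def, UInt32.le_iff_toNat_le, Bool.and_eq_true, decide_eq_true_eq]
  rfl

theorem pv_isupper_iff (c : Char) : PySem.Chars.isupper c = true ↔ 65 ≤ c.toNat ∧ c.toNat ≤ 90 := by
  simp only [PySem.Chars.isupper, Char.le_def, UInt32.le_iff_toNat_le, Bool.and_eq_true, decide_eq_true_eq]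
  rfl

theorem pv_isalpha_iff (c : Char) :
    PySem.Chars.isalpha c = true ↔ (65 ≤ c.toNat ∧ c.toNat ≤ 90) ∨ (97 ≤ c.toNat ∧ c.toNat ≤ 122) := by
  simp only [PySem.Chars.isalpha, Bool.or_eq_true, pv_isupper_iff, pv_islower_iff]

theorem pv_mod26 (a : Int) : PySem.Int.mod a 26 = a % 26 := by
  rw [PySem.Int.mod_eq_emod_of_pos]
  norm_num

-- shifting back by one after decoding by k is decoding by k+1
theorem pvBack1_decode (k : Int) (c : Char) :
    pvBack1 (pvDecodeChar k c) = pvDecodeChar (k + 1) c := by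
  by_cases ha : PySem.Chars.isalpha c
  · rcases (pv_isalpha_iff c).mp ha with hb | hb
    · -- uppercase
      have hl : PySem.Chars.islower c = false := by
        rw [Bool.eq_false_iff, Ne, pv_islower_iff]; omega
      have hm : 0 ≤ ((c.toNat : Int) - 65 - k) % 26 ∧ ((c.toNat : Int) - 65 - k) % 26 < 26 :=
        ⟨Int.emod_nonneg _ (by norm_num), Int.emod_lt_of_pos _ (by norm_num)⟩
      set m : Int := ((c.toNat : Int) - 65 - k) % 26 with hmdef
      have hd : pvDecodeChar k c = Char.ofNat (m + 65).toNat := by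
        simp only [pvDecodeChar, ha, hl, if_true, Bool.false_eq_true, if_false, pv_mod26]
        rw [← hmdef]
      have hn : (Char.ofNat (m + 65).toNat).toNat = (m + 65).toNat :=
        pv_toNat_ofNat _ (by omega)
      have halpha : PySem.Chars.isalpha (Char.ofNat (m + 65).toNat) = true := by
        rw [pv_isalpha_iff, hn]; omega
      have hlow : PySem.Chars.islower (Char.ofNat (m + 65).toNat) = false := by
        rw [Bool.eq_false_iff, Ne, pv_islower_iff, hn]; omega
      rw [hd]
      simp only [pvBack1, pvDecodeChar, halpha, hlow, ha, hl, if_true, Bool.false_eq_true,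
        if_false, pv_mod26, hn]
      congr 2
      have : ((m + 65).toNat : Int) = m + 65 := Int.toNat_of_nonneg (by omega)
      rw [this]
      omega
    · -- lowercase
      have hl : PySem.Chars.islower c = true := (pv_islower_iff c).mpr hb
      have hm : 0 ≤ ((c.toNat : Int) - 97 - k) % 26 ∧ ((c.toNat : Int) - 97 - k) % 26 < 26 :=
        ⟨Int.emod_nonneg _ (by norm_num), Int.emod_lt_of_pos _ (by norm_num)⟩
      set m : Int := ((c.toNat : Int) - 97 - k) % 26 with hmdef
      have hd : pvDecodeChar k c = Char.ofNat (m + 97).toNat := by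
        simp only [pvDecodeChar, ha, hl, if_true, pv_mod26]
        rw [← hmdef]
      have hn : (Char.ofNat (m + 97).toNat).toNat = (m + 97).toNat :=
        pv_toNat_ofNat _ (by omega)
      have halpha : PySem.Chars.isalpha (Char.ofNat (m + 97).toNat) = true := by
        rw [pv_isalpha_iff, hn]; omega
      have hlow : PySem.Chars.islower (Char.ofNat (m + 97).toNat) = true := by
        rw [pv_islower_iff, hn]; omega
      rw [hd]
      simp only [pvBack1, pvDecodeChar, halpha, hlow, ha, hl, if_true, pv_mod26, hn]
      congr 2
      have : ((m + 97).toNat : Int) = m + 97 := Int.toNat_of_nonneg (by omega)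
      rw [this]
      omega
  · simp only [pvBack1, pvDecodeChar, ha, Bool.false_eq_true, if_false]

theorem pvDecodeChar_zero (c : Char) : pvDecodeChar 0 c = c := by
  by_cases ha : PySem.Chars.isalpha c
  · rcases (pv_isalpha_iff c).mp ha with hb | hb
    · have hl : PySem.Chars.islower c = false := by
        rw [Bool.eq_false_iff, Ne, pv_islower_iff]; omega
      simp only [pvDecodeChar, ha, hl, if_true, Bool.false_eq_true, if_false, pv_mod26]
      have h1 : ((c.toNat : Int) - 65 - 0) % 26 = (c.toNat : Int) - 65 := by omega
      rw [h1]
      have h2 : ((c.toNat : Int) - 65 + 65).toNat = c.toNat := by omega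
      rw [h2, Char.ofNat_toNat]
    · have hl : PySem.Chars.islower c = true := (pv_islower_iff c).mpr hb
      simp only [pvDecodeChar, ha, hl, if_true, pv_mod26]
      have h1 : ((c.toNat : Int) - 97 - 0) % 26 = (c.toNat : Int) - 97 := by omega
      rw [h1]
      have h2 : ((c.toNat : Int) - 97 + 97).toNat = c.toNat := by omega
      rw [h2, Char.ofNat_toNat]
  · simp only [pvDecodeChar, ha, Bool.false_eq_true, if_false]

theorem pv_map_back1 (k : Int) (cs : List Char) :
    (cs.map (pvDecodeChar k)).map pvBack1 = cs.map (pvDecodeChar (k + 1)) := by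
  rw [List.map_map]
  exact List.map_congr_left (fun c _ => pvBack1_decode k c)

theorem pv_map_zero (cs : List Char) : cs.map (pvDecodeChar 0) = cs := by
  rw [List.map_congr_left (fun c _ => pvDecodeChar_zero c)]
  simp

theorem pv_foldl_append (k : Int) (cs : List Char) (acc : List Char) :
    cs.foldl (fun pt letra => pt ++ [pvDecodeChar k letra]) acc = acc ++ cs.map (pvDecodeChar k) := by
  induction cs generalizing acc with
  | nil => simp
  | cons c cs ih => simp [List.foldl, ih]

-- B's fold over pyRange 1 (n+1) 1: state after the fold, by induction on n
theorem pv_alt_fold (cs : List Char) (n : Nat) (hn : 1 ≤ n) :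
    ((PySem.List.pyRange 1 (n : Int) 1).foldl
      (fun (st : List Char × List (String × Int)) k =>
        let current := st.1.map pvBack1
        (current, st.2 ++ [(String.ofList current, k)]))
      (cs, [(String.ofList cs, 0)]))
    = (cs.map (pvDecodeChar ((n : Int) - 1)),
       (List.range n).map (fun k : Nat => (String.ofList (cs.map (pvDecodeChar (k : Int))), (k : Int)))) := by
  induction n with
  | zero => omega
  | succ n ih =>
    by_cases h1 : 1 ≤ n
    · have hcastn : ((n + 1 : Nat) : Int) = (n : Int) + 1 := by push_cast; ring
      have hr : PySem.List.pyRange 1 ((n + 1 : Nat) : Int) 1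
          = PySem.List.pyRange 1 (n : Int) 1 ++ [(n : Int)] := by
        rw [hcastn,
          PySem.List.pyRange_one_append 1 (n : Int) ((n : Int) + 1) (by omega) (by omega),
          PySem.List.pyRange_one_cons (a := (n : Int)) (b := (n : Int) + 1) (by omega),
          PySem.List.pyRange_one_eq_nil (a := (n : Int) + 1) (b := (n : Int) + 1) (by omega)]
      rw [hr, List.foldl_append, ih h1]
      simp only [List.foldl]
      have hstep : (cs.map (pvDecodeChar ((n : Int) - 1))).map pvBack1
          = cs.map (pvDecodeChar (n : Int)) := by
        have h := pv_map_back1 ((n : Int) - 1) cs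
        rw [sub_add_cancel] at h
        exact h
      have hcast2 : ((n + 1 : Nat) : Int) - 1 = (n : Int) := by push_cast; ring
      rw [hstep, hcast2, List.range_succ, List.map_append, List.map_singleton]
    · have hn0 : n = 0 := by omega
      subst hn0
      have hr : PySem.List.pyRange 1 ((0 + 1 : Nat) : Int) 1 = [] := by
        rw [PySem.List.pyRange_one_eq_nil (by norm_num)]
      rw [hr]
      simp only [List.foldl]
      norm_num [List.range_succ, pv_map_zero]

-- ===== VERDICT (by name: the statement is the Claim_ definition above) =====
theorem shift_cipher_decodbf_spec : Claim_equal_shift_cipher_decodbf := by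
  intro s _
  unfold Spec_shift_cipher_decodbf shift_cipher_decodbf shift_cipher_decodbf_alt
  have hB := pv_alt_fold s.toList 26 (by norm_num)
  have hs : String.ofList s.toList = s := by exact String.ofList_toList
  rw [hs] at hB
  norm_num at hB
  rw [hB]
  have hA : ∀ (ks : List Int) (acc : List (String × Int)),
      ks.foldl (fun possible_plaintexts k =>
        possible_plaintexts ++ [(String.ofList (s.toList.foldl (fun pt letra => pt ++ [pvDecodeChar k letra]) []), k)]) acc
      = acc ++ ks.map (fun k => (String.ofList (s.toList.map (pvDecodeChar k)), k)) := by
    intro ks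
    induction ks with
    | nil => simp
    | cons k ks ih =>
      intro acc
      rw [List.foldl_cons, pv_foldl_append, List.nil_append, ih, List.map_cons,
        List.append_assoc, List.singleton_append]
  have hr : PySem.List.pyRange 0 26 1 = (List.range 26).map (fun k : Nat => (k : Int)) := by decide
  rw [hA, hr, List.map_map, List.nil_append]
  rfl
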